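-- pv_equiv track=rewrite | github.com/severin-lemaignan/dialogs | src/dialog/parsing/recherche_mot.py | rech_adv
-- ===== SOURCE A (Python) =====
-- list_adv=['here','tonight', 'yesterday', 'tomorrow', 'today']
--
-- def rech_adv (reste_phrase):
--   if reste_phrase ==[]:
--     return []
--   for i in reste_phrase:
--     for j in list_adv:
--       if j==i:
--         return [i]+rech_adv(reste_phrase[reste_phrase.index(i)+1:])
--   for k in reste_phrase:
--     if k.startswith('every'):
--         return [k]+rech_adv(reste_phrase[reste_phrase.index(k)+1:])
--   return []
-- ===== SOURCE B (Python) =====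
-- list_adv = ['here', 'tonight', 'yesterday', 'tomorrow', 'today']
-- adv_set = set(list_adv)
--
-- def rech_adv(reste_phrase):
--     # One linear pass: collect adverbs in order; 'every'-words accumulate in a
--     # pending tail that is discarded whenever a later adverb appears, so only
--     # the 'every'-words after the last adverb survive.
--     out = []
--     tail = []
--     for w in reste_phrase:
--         if w in adv_set:
--             out.append(w)
--             tail = []
--         elif w.startswith('every'):
--             tail.append(w)
--     return out + tail
-- ===== Notes on version B (the rewrite author's own statement) =====
-- stated objective: faster
-- what changed: A repeatedly rescans the whole remaining list (nested find loops plus .index plus a slice) and recurses on the suffix; B makes one linear left-to-right pass keeping the collected adverbs and a pending 'every'-word tail that is discarded whenever a later adverb appears.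
import Mathlib
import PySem

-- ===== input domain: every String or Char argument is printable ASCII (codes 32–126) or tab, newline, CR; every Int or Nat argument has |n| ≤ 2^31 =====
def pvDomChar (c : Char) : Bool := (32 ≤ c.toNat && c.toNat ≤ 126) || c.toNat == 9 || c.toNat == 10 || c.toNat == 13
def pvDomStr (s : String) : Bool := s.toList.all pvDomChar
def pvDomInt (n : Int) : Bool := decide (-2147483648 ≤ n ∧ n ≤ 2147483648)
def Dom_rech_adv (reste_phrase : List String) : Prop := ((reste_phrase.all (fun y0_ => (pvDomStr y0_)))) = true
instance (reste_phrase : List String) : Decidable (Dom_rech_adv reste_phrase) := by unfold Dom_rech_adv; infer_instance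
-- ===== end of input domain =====

-- B replaces A's quadratic restart-after-slice recursion by one linear left-to-right pass
-- (collected adverbs + a pending 'every'-word tail discarded at each adverb); objective: faster.

-- ===== PORT A =====
def listAdv : List String := ["here", "tonight", "yesterday", "tomorrow", "today"]

-- helper for A's termination: a found index is inside the list
theorem pvIndexLt {l : List String} {v : String} {p : Nat}
    (h : PySem.List.index? l v = some p) : p < l.length := by
  rw [PySem.List.index?_eq_some_iff] at h
  obtain ⟨pre, suf, rfl, hp, -⟩ := h
  simp [← hp]

def rech_adv (reste_phrase : List String) : List String :=
  if reste_phrase = [] then []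
  else
    match reste_phrase.find? (fun i => listAdv.any (fun j => j == i)) with
    | some i =>
      match h2 : PySem.List.index? reste_phrase i with
      | some p => i :: rech_adv (PySem.List.slice reste_phrase (some ((p : Int) + 1)) none)
      | none => []   -- unreachable: Python .index would raise, but find? guarantees membership
    | none =>
      match reste_phrase.find? (fun k => PySem.Str.startswith k "every") with
      | some k =>
        match h4 : PySem.List.index? reste_phrase k with
        | some p => k :: rech_adv (PySem.List.slice reste_phrase (some ((p : Int) + 1)) none)
        | none => []   -- unreachable likewise
      | none => []
termination_by reste_phrase.length
decreasing_by
  all_goals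
    have hlt := pvIndexLt (by assumption : PySem.List.index? reste_phrase _ = some p)
    rw [show ((p : Int) + 1) = ((p + 1 : Nat) : Int) by push_cast; ring,
        PySem.List.slice_from_natCast]
    simp only [List.length_drop]
    omega

-- ===== PORT B =====
def advSet : PySem.Set String := PySem.Set.ofList listAdv

def pvStep (st : List String × List String) (w : String) : List String × List String :=
  if PySem.Set.contains advSet w then (st.1 ++ [w], [])
  else if PySem.Str.startswith w "every" then (st.1, st.2 ++ [w])
  else st

def rech_adv_alt (reste_phrase : List String) : List String :=
  let st := reste_phrase.foldl pvStep ([], [])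
  st.1 ++ st.2

-- ===== PRECONDITION & SPEC =====
def Spec_rech_adv (reste_phrase : List String) (out : List String) : Prop := out = rech_adv_alt reste_phrase
instance (reste_phrase : List String) (out : List String) : Decidable (Spec_rech_adv reste_phrase out) := by unfold Spec_rech_adv; infer_instance

-- ===== CLAIM (what is proved, stated in full; the proofs are below) =====
def Claim_equal_rech_adv : Prop := ∀ (reste_phrase : List String), Dom_rech_adv reste_phrase → Spec_rech_adv reste_phrase (rech_adv reste_phrase)

-- ===== LEMMAS AND PROOFS =====

-- the two ports test the same adverb condition
theorem adv_eq (w : String) :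
    (listAdv.any (fun j => j == w)) = PySem.Set.contains advSet w := by
  rw [Bool.eq_iff_iff]
  simp only [advSet, listAdv, PySem.Set.ofList, PySem.Set.contains]
  simp [beq_iff_eq]
  constructor <;> rintro (h|h|h|h|h) <;> simp [h]

-- out-component shift: the accumulated output only grows by appending
theorem foldl_step_shift (l : List String) (o t : List String) :
    l.foldl pvStep (o, t) =
      (o ++ (l.foldl pvStep ([], t)).1, (l.foldl pvStep ([], t)).2) := by
  induction l generalizing o t with
  | nil => simp
  | cons w l ih =>
    simp only [List.foldl_cons, pvStep]
    split_ifs with h1 h2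
    · simp only [List.nil_append]
      rw [ih (o ++ [w]) [], ih [w] []]
      simp [List.append_assoc]
    · exact ih o (t ++ [w])
    · exact ih o t

-- on an adverb-free list the fold only appends the 'every'-words to the tail
theorem foldl_step_noAdv (l : List String) (t : List String)
    (h : ∀ w ∈ l, PySem.Set.contains advSet w = false) :
    l.foldl pvStep ([], t) = ([], t ++ l.filter (fun w => PySem.Str.startswith w "every")) := by
  induction l generalizing t with
  | nil => simp
  | cons w l ih =>
    have hw : PySem.Set.contains advSet w = false := h w (by simp)
    simp only [List.foldl_cons, pvStep]
    split_ifs with h1 h2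
    · rw [hw] at h1; exact absurd h1 (by simp)
    · rw [ih (t ++ [w]) (fun x hx => h x (by simp [hx]))]
      rw [List.filter_cons, if_pos h2]
      simp
    · rw [ih t (fun x hx => h x (by simp [hx]))]
      rw [List.filter_cons, if_neg h2]

-- B's recurrence at the first adverb
theorem alt_adv (pre suf : List String) (i : String)
    (hpre : ∀ w ∈ pre, PySem.Set.contains advSet w = false)
    (hi : PySem.Set.contains advSet i = true) :
    rech_adv_alt (pre ++ i :: suf) = i :: rech_adv_alt suf := by
  simp only [rech_adv_alt, List.foldl_append, List.foldl_cons]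
  rw [foldl_step_noAdv pre [] hpre]
  simp only [pvStep, hi, if_true, List.nil_append]
  rw [foldl_step_shift suf [i] []]
  simp

-- B on an adverb-free list is the 'every'-filter
theorem alt_noAdv (l : List String)
    (h : ∀ w ∈ l, PySem.Set.contains advSet w = false) :
    rech_adv_alt l = l.filter (fun w => PySem.Str.startswith w "every") := by
  simp only [rech_adv_alt]
  rw [foldl_step_noAdv l [] h]
  simp

-- A on an adverb-free list is the 'every'-filter
-- slice l [p+1:] is drop (p+1)
theorem pvSliceSucc (l : List String) (p : Nat) :
    PySem.List.slice l (some ((p : Int) + 1)) none = l.drop (p + 1) := by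
  rw [show ((p : Int) + 1) = ((p + 1 : Nat) : Int) by push_cast; ring,
      PySem.List.slice_from_natCast]

-- the found element's .index is its own position
theorem pvIndexOfSplit (pre suf : List String) (v : String)
    (hv : v ∉ pre) : PySem.List.index? (pre ++ v :: suf) v = some pre.length := by
  rw [PySem.List.index?_eq_some_iff]
  exact ⟨pre, suf, rfl, rfl, hv⟩

theorem pvDropSplit (pre suf : List String) (v : String) :
    (pre ++ v :: suf).drop (pre.length + 1) = suf := by
  rw [show pre ++ v :: suf = (pre ++ [v]) ++ suf by simp,
      show pre.length + 1 = (pre ++ [v]).length by simp,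
      List.drop_left]

theorem a_noAdv (l : List String)
    (h : ∀ w ∈ l, (listAdv.any (fun j => j == w)) = false) :
    rech_adv l = l.filter (fun w => PySem.Str.startswith w "every") := by
  induction hL : l.length using Nat.strong_induction_on generalizing l with
  | _ n ih =>
  subst hL
  have hfA : l.find? (fun i => listAdv.any (fun j => j == i)) = none :=
    List.find?_eq_none.mpr (fun x hx => by simp [h x hx])
  by_cases hnil : l = []
  · subst hnil; simp [rech_adv]
  · cases hfE : l.find? (fun k => PySem.Str.startswith k "every") with
    | none =>
      rw [rech_adv]
      simp only [hnil, if_false, hfA, hfE]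
      have : ∀ x ∈ l, ¬ PySem.Str.startswith x "every" = true :=
        List.find?_eq_none.mp hfE
      rw [List.filter_eq_nil_iff.mpr this]
    | some k =>
      obtain ⟨hk, pre, suf, rfl, hpre⟩ := List.find?_eq_some_iff_append.mp hfE
      have hpre' : ∀ a ∈ pre, ¬ (PySem.Str.startswith a "every" = true) :=
        fun a ha => by simpa using hpre a ha
      have hknp : k ∉ pre := fun hmem => hpre' k hmem hk
      rw [rech_adv]
      simp only [hnil, if_false, hfA, hfE, pvSliceSucc]
      split
      case _ p hp =>
        rw [pvIndexOfSplit pre suf k hknp] at hp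
        obtain rfl : pre.length = p := Option.some.inj hp
        rw [pvDropSplit,
          ih suf.length (by simp; omega) suf (fun w hw => h w (by simp [hw])) rfl,
          List.filter_append, List.filter_cons, if_pos hk,
          List.filter_eq_nil_iff.mpr hpre']
        simp
      case _ hp =>
        rw [pvIndexOfSplit pre suf k hknp] at hp
        cases hp

-- ===== VERDICT (by name: the statement is the Claim_ definition above) =====
-- main equivalence
theorem a_eq_alt (l : List String) : rech_adv l = rech_adv_alt l := by
  induction hL : l.length using Nat.strong_induction_on generalizing l with
  | _ n ih =>
  subst hL
  by_cases hnil : l = []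
  · subst hnil; simp [rech_adv, rech_adv_alt]
  · cases hfA : l.find? (fun i => listAdv.any (fun j => j == i)) with
    | none =>
      have hall : ∀ w ∈ l, (listAdv.any (fun j => j == w)) = false := fun w hw => by
        have := List.find?_eq_none.mp hfA w hw
        simp only [Bool.not_eq_true] at this
        exact this
      rw [a_noAdv l hall, alt_noAdv l (fun w hw => by rw [← adv_eq]; exact hall w hw)]
    | some i =>
      obtain ⟨hi, pre, suf, rfl, hpre⟩ := List.find?_eq_some_iff_append.mp hfA
      have hpre' : ∀ a ∈ pre, (listAdv.any (fun j => j == a)) = false :=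
        fun a ha => by simpa using hpre a ha
      have hinp : i ∉ pre := fun hmem => by simp [hpre' i hmem] at hi
      rw [rech_adv]
      simp only [hnil, if_false, hfA, pvSliceSucc]
      split
      case _ p hp =>
        rw [pvIndexOfSplit pre suf i hinp] at hp
        obtain rfl : pre.length = p := Option.some.inj hp
        rw [pvDropSplit, ih suf.length (by simp; omega) suf rfl,
          alt_adv pre suf i
            (fun w hw => by rw [← adv_eq]; exact hpre' w hw)
            (by rw [← adv_eq]; exact hi)]
      case _ hp =>
        rw [pvIndexOfSplit pre suf i hinp] at hp
        cases hp

-- ===== final verdict =====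
theorem rech_adv_spec : Claim_equal_rech_adv := by
  intro l _
  unfold Spec_rech_adv
  exact a_eq_alt l
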